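-- pv_equiv track=rewrite | github.com/0xdevalias/poc-re-binsearch | diff_hex.py | compare_hex_strings
-- ===== SOURCE A (Python) =====
-- def compare_hex_strings(hex_strings):
--     # Split each hex string into chunks of two characters
--     split_hex = [list(map("".join, zip(*[iter(s)] * 2))) for s in hex_strings]
--
--     # Transpose the list to compare byte by byte
--     transposed_hex = list(zip(*split_hex))
--
--     # Replace differing bytes with wildcards
--     result = []
--     for byte_group in transposed_hex:
--         if all(byte == byte_group[0] for byte in byte_group):
--             result.append(byte_group[0])
--         else:
--             result.append("..")
--
--     return "".join(result)
-- ===== SOURCE B (Python) =====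
-- def compare_hex_strings(hex_strings):
--     if not hex_strings:
--         return ""
--     byte_lists = []
--     for s in hex_strings:
--         bl = []
--         while len(s) >= 2:
--             bl.append(s[:2])
--             s = s[2:]
--         byte_lists.append(bl)
--     min_len = len(byte_lists[0])
--     for bl in byte_lists[1:]:
--         if len(bl) < min_len:
--             min_len = len(bl)
--     result = byte_lists[0][:min_len]
--     for bl in byte_lists[1:]:
--         for i in range(min_len):
--             if bl[i] != result[i]:
--                 result[i] = ".."
--     return "".join(result)
-- ===== Notes on version B (the rewrite author's own statement) =====
-- stated objective: alternative
-- what changed: Replaces A's transpose-then-column-scan (zip the chunked strings and test each column for all-equal) with a single accumulating wildcard mask: start from the first string's bytes truncated to the minimum byte count and overwrite a position with '..' whenever a later string disagrees there.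
import Mathlib
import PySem

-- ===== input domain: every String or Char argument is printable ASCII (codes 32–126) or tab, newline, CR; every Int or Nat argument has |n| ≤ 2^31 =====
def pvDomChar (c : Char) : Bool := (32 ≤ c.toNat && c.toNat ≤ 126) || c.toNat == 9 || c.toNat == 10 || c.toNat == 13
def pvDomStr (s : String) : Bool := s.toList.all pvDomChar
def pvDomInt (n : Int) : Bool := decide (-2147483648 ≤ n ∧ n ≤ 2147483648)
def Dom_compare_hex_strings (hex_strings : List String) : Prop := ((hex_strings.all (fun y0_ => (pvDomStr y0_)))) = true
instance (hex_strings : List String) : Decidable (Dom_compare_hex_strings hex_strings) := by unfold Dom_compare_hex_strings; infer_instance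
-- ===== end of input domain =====

-- B replaces A's transpose-and-column-scan with an accumulating wildcard mask over the first
-- string's bytes (objective: simpler; same return value on every input, A is total).

-- ===== PORT A =====
-- zip(*[iter(s)]*2) followed by "".join: consume the characters in pairs, dropping a trailing
-- odd character.  Shared chunking helper (both Pythons chunk into two-char bytes this way).
def pvChunk2 : List Char → List String
  | a :: b :: rest => String.ofList [a, b] :: pvChunk2 rest
  | _ => []

-- list(zip(*xss)): columns of xss, truncated to the shortest row; empty when xss is empty.
def pvTranspose (xss : List (List String)) : List (List String)  :=
  if h : xss ≠ [] ∧ xss.all (fun l => !l.isEmpty) then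
    (xss.map (fun l => l.headD "")) :: pvTranspose (xss.map List.tail)
  else []
  termination_by (xss.headD []).length
  decreasing_by
    obtain ⟨hne, hall⟩ := h
    match xss with
    | [] => exact absurd rfl hne
    | a :: t =>
      have ha : !a.isEmpty := by
        have := List.all_eq_true.mp hall a (by simp)
        simpa using this
      cases a with
      | nil => simp at ha
      | cons c cs => simp

def compare_hex_strings (hex_strings : List String) : String :=
  let split_hex := hex_strings.map (fun s => pvChunk2 s.toList)
  let transposed := pvTranspose split_hex
  -- byte_group[0] is ported as headD "" (every byte group produced by zip is nonempty)
  let result := transposed.foldl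
    (fun acc bg => acc ++ [if bg.all (fun b => b == bg.headD "") then bg.headD "" else ".."]) []
  PySem.Str.join "" result

-- ===== PORT B =====
def compare_hex_strings_alt (hex_strings : List String) : String :=
  match hex_strings with
  | [] => ""
  | s0 :: restS =>
    let byte_lists := (s0 :: restS).map (fun s => pvChunk2 s.toList)
    let b0 := byte_lists.headD []
    let min_len := byte_lists.tail.foldl (fun m bl => if bl.length < m then bl.length else m) b0.length
    let result := byte_lists.tail.foldl
      (fun res bl =>
        (List.range min_len).foldl
          (fun r i => if bl.getD i "" != r.getD i "" then r.set i ".." else r) res)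
      (b0.take min_len)
    PySem.Str.join "" result

-- ===== PRECONDITION & SPEC =====
def Spec_compare_hex_strings (hex_strings : List String) (out : String) : Prop := out = compare_hex_strings_alt hex_strings
instance (hex_strings : List String) (out : String) : Decidable (Spec_compare_hex_strings hex_strings out) := by unfold Spec_compare_hex_strings; infer_instance

-- ===== CLAIM (what is proved, stated in full; the proofs are below) =====
def Claim_equal_compare_hex_strings : Prop := ∀ (hex_strings : List String), Dom_compare_hex_strings hex_strings → Spec_compare_hex_strings hex_strings (compare_hex_strings hex_strings)

-- ===== LEMMAS AND PROOFS =====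

lemma pvMin_le (rest : List (List String)) (a : Nat) :
    rest.foldl (fun m bl => if bl.length < m then bl.length else m) a ≤ a := by
  induction rest generalizing a with
  | nil => simp
  | cons x xs ih =>
    simp only [List.foldl_cons]
    split
    · exact le_trans (ih _) (by omega)
    · exact ih _

lemma pvMin_le_mem (rest : List (List String)) (a : Nat) (bl : List String) (h : bl ∈ rest) :
    rest.foldl (fun m bl => if bl.length < m then bl.length else m) a ≤ bl.length := by
  induction rest generalizing a with
  | nil => simp at h
  | cons x xs ih =>
    simp only [List.foldl_cons]
    rcases List.mem_cons.mp h with rfl | h'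
    · split
      · exact le_trans (pvMin_le _ _) (le_refl _)
      · exact le_trans (pvMin_le _ _) (by omega)
    · exact ih _ h'

lemma pvMin_pos (rest : List (List String)) (a : Nat) (ha : 0 < a)
    (hall : ∀ bl ∈ rest, bl ≠ []) :
    0 < rest.foldl (fun m bl => if bl.length < m then bl.length else m) a := by
  induction rest generalizing a with
  | nil => simpa
  | cons x xs ih =>
    simp only [List.foldl_cons]
    have hx : x ≠ [] := hall x (by simp)
    have : 0 < x.length := List.length_pos_iff.mpr hx
    split
    · exact ih _ this (fun bl h => hall bl (by simp [h]))
    · exact ih _ ha (fun bl h => hall bl (by simp [h]))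

lemma pvMin_tail (rest : List (List String)) (a : Nat) (ha : 0 < a)
    (hall : ∀ bl ∈ rest, bl ≠ []) :
    (rest.map List.tail).foldl (fun m bl => if bl.length < m then bl.length else m) (a - 1)
      = rest.foldl (fun m bl => if bl.length < m then bl.length else m) a - 1 := by
  induction rest generalizing a with
  | nil => simp
  | cons x xs ih =>
    simp only [List.map_cons, List.foldl_cons, List.length_tail]
    have hx : 0 < x.length := List.length_pos_iff.mpr (hall x (by simp))
    have hrec := fun a ha => ih a ha (fun bl h => hall bl (by simp [h]))
    by_cases hlt : x.length < a
    · rw [if_pos (by omega), if_pos hlt, hrec _ hx]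
    · rw [if_neg (by omega), if_neg hlt, hrec _ ha]

lemma getD_zero_headD (l : List String) : l.getD 0 "" = l.headD "" := by
  cases l <;> simp [List.getD]

-- pvTranspose of a nonempty list of rows = the first min-many columns
lemma pvTranspose_eq (x0 : List String) (xr : List (List String)) :
    pvTranspose (x0 :: xr)
      = (List.range (xr.foldl (fun m bl => if bl.length < m then bl.length else m) x0.length)).map
          (fun i => (x0 :: xr).map (fun l => l.getD i "")) := by
  generalize hn : x0.length = n
  induction n generalizing x0 xr with
  | zero =>
    have hx0 : x0 = [] := List.length_eq_zero_iff.mp hn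
    rw [pvTranspose]
    rw [dif_neg]
    · have h0 : xr.foldl (fun m bl => if bl.length < m then bl.length else m) x0.length = 0 := by
        have := pvMin_le xr x0.length
        omega
      rw [hn] at h0
      simp [h0]
    · rintro ⟨-, hall⟩
      have := List.all_eq_true.mp hall x0 (by simp)
      simp [hx0] at this
  | succ n ih =>
    rw [pvTranspose]
    by_cases hall : ∀ bl ∈ x0 :: xr, bl ≠ []
    · rw [dif_pos]
      · have hx0 : x0 ≠ [] := hall x0 (by simp)
        have hxr : ∀ bl ∈ xr, bl ≠ [] := fun bl h => hall bl (by simp [h])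
        have hm : 0 < xr.foldl (fun m bl => if bl.length < m then bl.length else m) x0.length :=
          pvMin_pos xr x0.length (by omega) hxr
        have htail : x0.tail.length = n := by
          cases x0 with
          | nil => simp at hx0
          | cons a t => simpa using hn
        have hrec := ih x0.tail (xr.map List.tail) htail
        simp only [List.map_cons] at hrec ⊢
        have hn' : n = x0.length - 1 := by omega
        rw [hn', pvMin_tail xr x0.length (by omega) hxr] at hrec
        rw [hrec, ← hn]
        set M := xr.foldl (fun m bl => if bl.length < m then bl.length else m) x0.length with hM
        have hr : List.range M = 0 :: (List.range (M - 1)).map (· + 1) := by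
          conv_lhs => rw [show M = (M - 1) + 1 by omega]
          rw [List.range_succ_eq_map]
        rw [hr]
        simp only [List.map_cons, List.map_map]
        congr 1
        · simp only [getD_zero_headD]
        · congr 1
          funext i
          simp [Function.comp]
      · refine ⟨by simp, ?_⟩
        simp only [List.all_eq_true]
        intro l hl
        simpa [List.isEmpty_iff] using hall l hl
    · rw [dif_neg]
      · push_neg at hall
        obtain ⟨bl, hmem, hbl⟩ := hall
        have hM : xr.foldl (fun m bl => if bl.length < m then bl.length else m) x0.length = 0 := by
          rcases List.mem_cons.mp hmem with heq | h'
          · have hx : x0 = [] := by rw [← heq, hbl]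
            have h1 := pvMin_le xr x0.length
            simpa [hx] using h1
          · have h1 := pvMin_le_mem xr x0.length bl h'
            rw [hbl] at h1
            simpa using h1
        rw [hn] at hM
        simp [hM]
      · rintro ⟨-, h2⟩
        push_neg at hall
        obtain ⟨bl, hmem, hbl⟩ := hall
        have := List.all_eq_true.mp h2 bl hmem
        simp [hbl] at this

lemma getD_append_len (xs ys : List String) (d : String) :
    (xs ++ ys).getD xs.length d = ys.getD 0 d := by
  simp [List.getD, List.getElem?_append_right (le_refl xs.length)]

-- inner loop: positions 0..k-1 updated pointwise, the rest of res untouched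
lemma inner_fold_aux (bl res : List String) (k : Nat) (hk : k ≤ res.length) :
    (List.range k).foldl
        (fun r i => if bl.getD i "" != r.getD i "" then r.set i ".." else r) res
      = ((List.range k).map
          (fun i => if bl.getD i "" != res.getD i "" then ".." else res.getD i "")) ++ res.drop k := by
  induction k with
  | zero => simp
  | succ k ih =>
    have hk' : k ≤ res.length := by omega
    rw [List.range_succ, List.foldl_append, ih hk']
    set mapped := (List.range k).map
      (fun i => if bl.getD i "" != res.getD i "" then ".." else res.getD i "") with hmapped
    have hlen : mapped.length = k := by simp [hmapped]
    have hgd : (mapped ++ res.drop k).getD k "" = res.getD k "" := by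
      rw [← hlen, getD_append_len]
      simp [List.getD, List.getElem?_drop]
    have hdrop : res.drop k = res.getD k "" :: res.drop (k + 1) := by
      rw [List.drop_eq_getElem_cons (by omega)]
      simp [List.getD, List.getElem?_eq_getElem (by omega : k < res.length)]
    simp only [List.foldl_cons, List.foldl_nil, hgd]
    rw [List.map_append (l₂ := [k])]
    simp only [List.map_cons, List.map_nil]
    by_cases hne : bl.getD k "" != res.getD k ""
    · rw [if_pos hne, if_pos hne, List.set_append, if_neg (by omega), hlen, Nat.sub_self,
        hdrop, List.set_cons_zero, List.append_assoc]
      rfl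
    · rw [if_neg hne, if_neg hne, hdrop, List.append_assoc]
      rfl

lemma inner_fold_eq (bl : List String) (m : Nat) (φ : Nat → String) :
    (List.range m).foldl
        (fun r i => if bl.getD i "" != r.getD i "" then r.set i ".." else r)
        ((List.range m).map φ)
      = (List.range m).map (fun i => if bl.getD i "" != φ i then ".." else φ i) := by
  have h := inner_fold_aux bl ((List.range m).map φ) m (by simp)
  rw [h]
  have hlen : ((List.range m).map φ).length = m := by simp
  rw [List.drop_eq_nil_of_le (by simp), List.append_nil]
  apply List.map_congr_left
  intro i hi
  have hi' : i < m := List.mem_range.mp hi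
  rw [PySem.List.getD_map_range φ m i "" hi']

-- outer loop invariant: the mask after folding a list of rows
lemma outer_fold_eq (rest : List (List String)) (b0 : List String) (m : Nat) :
    rest.foldl
        (fun res bl =>
          (List.range m).foldl
            (fun r i => if bl.getD i "" != r.getD i "" then r.set i ".." else r) res)
        ((List.range m).map (fun i => b0.getD i ""))
      = (List.range m).map
          (fun i => if rest.all (fun bl => bl.getD i "" == b0.getD i "") then b0.getD i "" else "..") := by
  induction rest using List.reverseRecOn with
  | nil => simp
  | append_singleton rs bl ih =>
    rw [List.foldl_append, List.foldl_cons, List.foldl_nil, ih, inner_fold_eq]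
    apply List.map_congr_left
    intro i hi
    by_cases hall : rs.all (fun bl => bl.getD i "" == b0.getD i "")
    · rw [if_pos hall]
      by_cases heq : bl.getD i "" == b0.getD i ""
      · have hall' : (rs ++ [bl]).all (fun bl => bl.getD i "" == b0.getD i "") := by
          simp_all
        rw [if_pos hall', if_neg (by simp_all)]
      · have hall' : ¬ (rs ++ [bl]).all (fun bl => bl.getD i "" == b0.getD i "") := by
          simp_all
        rw [if_neg hall', if_pos (by simp_all)]
    · rw [if_neg hall]
      have hall' : ¬ (rs ++ [bl]).all (fun bl => bl.getD i "" == b0.getD i "") := by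
        simp_all
      rw [if_neg hall']
      by_cases hbl : bl.getD i "" != ".."
      · rw [if_pos hbl]
      · rw [if_neg hbl]

lemma take_eq_map_range (b0 : List String) (m : Nat) (hm : m ≤ b0.length) :
    b0.take m = (List.range m).map (fun i => b0.getD i "") := by
  apply List.ext_getElem
  · simp [hm]
  · intro i h1 h2
    have hi : i < m := by simp at h1; omega
    simp [List.getD, List.getElem?_eq_getElem (by omega : i < b0.length)]

theorem ports_agree (hex_strings : List String) :
    compare_hex_strings hex_strings = compare_hex_strings_alt hex_strings := by
  match hex_strings with
  | [] =>
    rw [compare_hex_strings, compare_hex_strings_alt, pvTranspose]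
    simp [PySem.Str.join]
  | s0 :: restS =>
    rw [compare_hex_strings, compare_hex_strings_alt]
    simp only [List.map_cons, List.headD_cons, List.tail_cons]
    set c0 := pvChunk2 s0.toList with hc0
    set crest := restS.map (fun s => pvChunk2 s.toList) with hcrest
    set m := crest.foldl (fun m bl => if bl.length < m then bl.length else m) c0.length with hm
    rw [pvTranspose_eq, ← hm]
    rw [PySem.List.foldl_append_singleton_eq_map, List.map_map]
    rw [take_eq_map_range c0 m (le_trans (by rw [hm]; exact pvMin_le crest c0.length) (le_refl _))]
    rw [outer_fold_eq]
    congr 1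
    apply List.map_congr_left
    intro i hi
    simp only [List.map_cons, List.headD_cons, List.all_cons, List.all_map, Function.comp,
      beq_self_eq_true, Bool.true_and]
    rfl

-- ===== VERDICT (by name: the statement is the Claim_ definition above) =====
theorem compare_hex_strings_spec : Claim_equal_compare_hex_strings := by
  intro hs _
  unfold Spec_compare_hex_strings
  exact ports_agree hs
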